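-- pv_equiv track=rewrite | github.com/susami-jpg/atcoder_probrem | 部分列dp.py | calc_next
-- ===== SOURCE A (Python) =====
-- def int_to_str(n):
--     return chr(n+97)
--
-- def calc_next(s):
--     l = len(s)
--     next = [[l] * 26 for _ in range(l+1)]
--     for i in range(l-1, -1, -1):
--         for j in range(26):
--             now = s[i]
--             if s[i] == int_to_str(j):
--                 next[i][j] = i
--             else:
--                 next[i][j] = next[i+1][j]
--
--     return next
-- ===== SOURCE B (Python) =====
-- def calc_next(s):
--     l = len(s)
--     cols = []
--     for j in range(26):
--         c = chr(j + 97)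
--         ps = [i for i in range(l) if s[i] == c]
--         col = []
--         for p in ps:
--             col.extend([p] * (p + 1 - len(col)))
--         col.extend([l] * (l + 1 - len(col)))
--         cols.append(col)
--     return [list(row) for row in zip(*cols)]
-- ===== Notes on version B (the rewrite author's own statement) =====
-- stated objective: alternative
-- what changed: Replaces the backward row-by-row DP (each row derived from the next) with a column-major forward construction: for each of the 26 letters it collects the letter's occurrence positions, unrolls them into a full column of next-occurrence values by run-length extension, and transposes the 26 columns into rows.
import Mathlib
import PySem

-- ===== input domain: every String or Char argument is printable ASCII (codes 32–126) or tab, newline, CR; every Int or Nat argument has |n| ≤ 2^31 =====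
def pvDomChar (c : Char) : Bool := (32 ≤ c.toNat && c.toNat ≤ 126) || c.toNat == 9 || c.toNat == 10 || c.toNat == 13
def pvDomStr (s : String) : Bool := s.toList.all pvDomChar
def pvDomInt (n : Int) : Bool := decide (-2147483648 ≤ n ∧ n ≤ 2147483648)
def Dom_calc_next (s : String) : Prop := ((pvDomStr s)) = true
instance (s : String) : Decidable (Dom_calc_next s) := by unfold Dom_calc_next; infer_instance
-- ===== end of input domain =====

-- B builds the table column-major and forward (per-letter occurrence lists unrolled into columns,
-- then transposed) instead of A's backward row-by-row DP; same asymptotic cost, alternative algorithm.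

-- ===== PORT A =====
-- int_to_str(n) = chr(n+97); only called with 0 ≤ n ≤ 25, where chr is exact
def int_to_str (n : Nat) : Char := Char.ofNat (n + 97)

-- literal port of A: table of (l+1) rows, countdown loop sets row i from row i+1
-- (s[i] is read via getD at i.toNat: every i produced by the range is in [0, l))
def calc_next (s : String) : List (List Int) :=
  let cs := s.toList
  let l : Int := (cs.length : Int)
  let next0 : List (List Int) := List.replicate (cs.length + 1) (List.replicate 26 l)
  (PySem.List.pyRange (l - 1) (-1) (-1)).foldl
    (fun next i =>
      next.set i.toNat
        ((List.range 26).map (fun j =>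
          if cs.getD i.toNat ' ' = int_to_str j then i
          else (next.getD (i.toNat + 1) []).getD j l)))
    next0

-- ===== PORT B =====
-- literal port of B: for each letter, occurrence positions, unrolled into a column, padded with l;
-- zip(*cols) is ported as the index-wise transpose, exact here because every column has length l+1
def calc_next_alt (s : String) : List (List Int) :=
  let cs := s.toList
  let l := cs.length
  let cols : List (List Int) := (List.range 26).map (fun j =>
    let c := Char.ofNat (j + 97)
    let ps := (List.range l).filter (fun i => cs.getD i ' ' = c)
    let col := ps.foldl (fun col p => col ++ List.replicate (p + 1 - col.length) ((p : Int))) ([] : List Int)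
    col ++ List.replicate (l + 1 - col.length) ((l : Int)))
  (List.range (l + 1)).map (fun i => cols.map (fun col => col.getD i 0))

-- ===== PRECONDITION & SPEC =====
def Spec_calc_next (s : String) (out : List (List Int)) : Prop := out = calc_next_alt s
instance (s : String) (out : List (List Int)) : Decidable (Spec_calc_next s out) := by unfold Spec_calc_next; infer_instance

-- ===== CLAIM (what is proved, stated in full; the proofs are below) =====
def Claim_equal_calc_next : Prop := ∀ (s : String), Dom_calc_next s → Spec_calc_next s (calc_next s)

-- ===== LEMMAS AND PROOFS =====

-- the common specification: nv cs c i = index of the first occurrence of c at position ≥ i, else length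
def nv (cs : List Char) (c : Char) (i : Nat) : Int :=
  match (cs.drop i).findIdx? (fun x => x = c) with
  | some k => ((i + k : Nat) : Int)
  | none => (cs.length : Int)

def specRow (cs : List Char) (i : Nat) : List Int :=
  (List.range 26).map (fun j => nv cs (Char.ofNat (j + 97)) i)

def specTable (cs : List Char) : List (List Int) :=
  (List.range (cs.length + 1)).map (specRow cs)

theorem nv_ge (cs : List Char) (c : Char) (i : Nat) (h : cs.length ≤ i) :
    nv cs c i = (cs.length : Int) := by
  unfold nv
  rw [List.drop_eq_nil_of_le h]
  rfl

theorem nv_rec (cs : List Char) (c : Char) (i : Nat) (h : i < cs.length) :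
    nv cs c i = if cs[i] = c then (i : Int) else nv cs c (i + 1) := by
  unfold nv
  rw [List.drop_eq_getElem_cons h, List.findIdx?_cons]
  by_cases hc : cs[i] = c
  · simp [hc]
  · rw [if_neg (by simp [hc]), if_neg hc]
    cases hfind : (cs.drop (i + 1)).findIdx? (fun x => decide (x = c)) with
    | some k =>
        simp only [Option.map_some]
        show ((i + (k + 1) : Nat) : Int) = ((i + 1 + k : Nat) : Int)
        congr 1
        omega
    | none =>
        simp only [Option.map_none]

theorem nv_eq_occ (cs : List Char) (c : Char) (i p : Nat) (hp : p < cs.length)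
    (hc : cs[p] = c) (hip : i ≤ p)
    (hno : ∀ k, i ≤ k → k < p → ∀ (h : k < cs.length), cs[k] ≠ c) :
    nv cs c i = (p : Int) := by
  induction hd : p - i generalizing i with
  | zero =>
      have : i = p := by omega
      subst this
      rw [nv_rec cs c i hp, if_pos hc]
  | succ d ih =>
      have hil : i < cs.length := by omega
      rw [nv_rec cs c i hil, if_neg (hno i le_rfl (by omega) hil)]
      exact ih (i + 1) (by omega) (fun k hk1 hk2 h => hno k (by omega) hk2 h) (by omega)

theorem nv_eq_len (cs : List Char) (c : Char) (i : Nat)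
    (hno : ∀ k, i ≤ k → ∀ (h : k < cs.length), cs[k] ≠ c) :
    nv cs c i = (cs.length : Int) := by
  induction hd : cs.length - i generalizing i with
  | zero => exact nv_ge cs c i (by omega)
  | succ d ih =>
      have hil : i < cs.length := by omega
      rw [nv_rec cs c i hil, if_neg (hno i le_rfl hil)]
      exact ih (i + 1) (fun k hk1 h => hno k (by omega) h) (by omega)

-- B's column fold: invariant after scanning positions < n
theorem colB_inv (cs : List Char) (c : Char) (n : Nat) (hn : n ≤ cs.length) :
    let col := (((List.range n).filter (fun i => cs.getD i ' ' = c)).foldl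
      (fun col p => col ++ List.replicate (p + 1 - col.length) ((p : Int))) ([] : List Int))
    col.length ≤ n ∧
    (∀ k, col.length ≤ k → k < n → ∀ (h : k < cs.length), cs[k] ≠ c) ∧
    col = (List.range col.length).map (nv cs c) := by
  induction n with
  | zero => simp
  | succ n ih =>
      intro col
      obtain ⟨h1, h2, h3⟩ := ih (by omega)
      set prev := (((List.range n).filter (fun i => cs.getD i ' ' = c)).foldl
        (fun col p => col ++ List.replicate (p + 1 - col.length) ((p : Int))) ([] : List Int)) with hprev
      have hnl : n < cs.length := hn
      have hgd : cs.getD n ' ' = cs[n] := List.getD_eq_getElem cs ' ' hnl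
      by_cases hc : cs[n] = c
      · have hfil : (List.range (n + 1)).filter (fun i => cs.getD i ' ' = c)
            = (List.range n).filter (fun i => cs.getD i ' ' = c) ++ [n] := by
          rw [List.range_succ, List.filter_append, List.filter_singleton]
          simp [List.getElem?_eq_getElem hnl, hc]
        have hcol2 : col = prev ++ List.replicate (n + 1 - prev.length) ((n : Int)) := by
          show ((List.range (n + 1)).filter _).foldl _ _ = _
          rw [hfil, List.foldl_append]
          rfl
        have hlen : col.length = n + 1 := by
          rw [hcol2]; simp only [List.length_append, List.length_replicate]; omega
        refine ⟨by omega, by omega, ?_⟩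
        rw [hcol2]
        apply List.ext_getElem
        · simp
        · intro k hk1 hk2
          simp only [List.length_range, List.length_map] at hk2
          rw [List.getElem_map, List.getElem_range]
          by_cases hkp : k < prev.length
          · rw [List.getElem_append_left hkp, List.getElem_of_eq h3 hkp,
                List.getElem_map, List.getElem_range]
          · rw [List.getElem_append_right (by omega), List.getElem_replicate]
            have hkn : k ≤ n := by
              have hk1' : k < col.length := by rw [hcol2]; exact hk1
              omega
            exact (nv_eq_occ cs c k n hnl hc hkn
              (fun m hm1 hm2 h => h2 m (by omega) (by omega) h)).symm
      · have hfil : (List.range (n + 1)).filter (fun i => cs.getD i ' ' = c)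
            = (List.range n).filter (fun i => cs.getD i ' ' = c) := by
          rw [List.range_succ, List.filter_append, List.filter_singleton]
          simp [List.getElem?_eq_getElem hnl, hc]
        have hcol2 : col = prev := by
          show ((List.range (n + 1)).filter _).foldl _ _ = _
          rw [hfil]
        refine ⟨by rw [hcol2]; omega, ?_, by rw [hcol2]; exact h3⟩
        intro k hk1 hk2 h
        rw [hcol2] at hk1
        by_cases hkn : k < n
        · exact h2 k hk1 hkn h
        · have : k = n := by omega
          subst this; exact hc
      
-- B's full column equals the spec column
theorem colB_eq (cs : List Char) (c : Char) :
    (((List.range cs.length).filter (fun i => cs.getD i ' ' = c)).foldl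
      (fun col p => col ++ List.replicate (p + 1 - col.length) ((p : Int))) ([] : List Int))
      ++ List.replicate (cs.length + 1 - (((List.range cs.length).filter (fun i => cs.getD i ' ' = c)).foldl
      (fun col p => col ++ List.replicate (p + 1 - col.length) ((p : Int))) ([] : List Int)).length) ((cs.length : Int))
      = (List.range (cs.length + 1)).map (nv cs c) := by
  obtain ⟨h1, h2, h3⟩ := colB_inv cs c cs.length le_rfl
  set col := (((List.range cs.length).filter (fun i => cs.getD i ' ' = c)).foldl
      (fun col p => col ++ List.replicate (p + 1 - col.length) ((p : Int))) ([] : List Int)) with hcol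
  apply List.ext_getElem
  · simp; omega
  · intro k hk1 hk2
    simp only [List.length_range, List.length_map] at hk2
    rw [List.getElem_map, List.getElem_range]
    by_cases hkp : k < col.length
    · rw [List.getElem_append_left hkp, List.getElem_of_eq h3 hkp,
          List.getElem_map, List.getElem_range]
    · rw [List.getElem_append_right (by omega), List.getElem_replicate]
      by_cases hkl : k < cs.length
      · exact (nv_eq_len cs c k (fun m hm1 h => h2 m (by omega) h h)).symm
      · exact (nv_ge cs c k (by omega)).symm

-- row l of the spec table is the all-l row
theorem specRow_last (cs : List Char) :
    specRow cs cs.length = List.replicate 26 ((cs.length : Int)) := by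
  unfold specRow
  apply List.ext_getElem
  · simp
  · intro k hk1 hk2
    simp only [List.getElem_map, List.getElem_range, List.getElem_replicate]
    exact nv_ge cs _ cs.length le_rfl

-- A's freshly computed row i equals spec row i, given row i+1 is spec row i+1
theorem rowA_eq (cs : List Char) (i : Nat) (hi : i < cs.length) :
    (List.range 26).map (fun j =>
        if cs.getD i ' ' = int_to_str j then (i : Int)
        else (specRow cs (i + 1)).getD j ((cs.length : Int)))
      = specRow cs i := by
  apply List.ext_getElem
  · simp [specRow]
  · intro j hj1 hj2
    simp only [List.length_map, List.length_range] at hj1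
    have hjlen : j < (specRow cs (i + 1)).length := by
      simp only [specRow, List.length_map, List.length_range]; omega
    have hgd2 : (specRow cs (i + 1)).getD j ((cs.length : Int))
        = nv cs (Char.ofNat (j + 97)) (i + 1) := by
      rw [List.getD_eq_getElem _ _ hjlen]
      simp only [specRow, List.getElem_map, List.getElem_range]
    simp only [List.getElem_map, List.getElem_range]
    rw [hgd2]
    simp only [specRow, List.getElem_map, List.getElem_range]
    rw [List.getD_eq_getElem cs ' ' hi, nv_rec cs _ i hi]
    rfl

-- invariant for A's fold: if rows ≥ k are already spec rows, the fold produces the spec table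
theorem foldA_inv (cs : List Char) (k : Nat) (hk : k ≤ cs.length) (T : List (List Int))
    (hT : T.length = cs.length + 1)
    (hrows : ∀ m, k ≤ m → m ≤ cs.length → T.getD m [] = specRow cs m) :
    (PySem.List.pyRange ((k : Int) - 1) (-1) (-1)).foldl
      (fun next i =>
        next.set i.toNat
          ((List.range 26).map (fun j =>
            if cs.getD i.toNat ' ' = int_to_str j then i
            else (next.getD (i.toNat + 1) []).getD j ((cs.length : Int)))))
      T = specTable cs := by
  induction k generalizing T with
  | zero =>
      rw [PySem.List.pyRange_neg_one_eq_nil (by norm_num)]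
      simp only [List.foldl_nil]
      apply List.ext_getElem
      · simp [specTable, hT]
      · intro m hm1 hm2
        simp only [specTable, List.getElem_map, List.getElem_range]
        rw [← List.getD_eq_getElem T [] hm1]
        exact hrows m (by omega) (by omega)
  | succ k ih =>
      have hcons : PySem.List.pyRange ((k + 1 : Nat) - 1) (-1) (-1)
          = (k : Int) :: PySem.List.pyRange ((k : Int) - 1) (-1) (-1) := by
        have := PySem.List.pyRange_neg_one_cons (a := (k : Int)) (b := (-1)) (by omega)
        push_cast
        simpa using this
      rw [hcons, List.foldl_cons]
      simp only [Int.toNat_natCast]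
      have hrowk1 : T.getD (k + 1) [] = specRow cs (k + 1) := hrows (k + 1) le_rfl hk
      rw [hrowk1, rowA_eq cs k hk]
      apply ih (by omega)
      · simpa using hT
      · intro m hm1 hm2
        by_cases hmk : m = k
        · subst hmk
          rw [List.getD_eq_getElem _ _ (by simp; omega)]
          rw [List.getElem_set, if_pos rfl]
        · rw [List.getD_eq_getElem _ _ (by simp; omega),
              List.getElem_set, if_neg (fun h => hmk h.symm), ← List.getD_eq_getElem T [] (by omega)]
          exact hrows m (by omega) hm2

-- B equals the spec table
theorem altB_eq (s : String) : calc_next_alt s = specTable s.toList := by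
  unfold calc_next_alt specTable
  simp only []
  apply List.ext_getElem
  · simp
  · intro i hi1 hi2
    simp only [List.length_range, List.length_map] at hi2
    have hsl : s.toList.length = s.length := by simp
    simp only [List.getElem_map, List.getElem_range]
    unfold specRow
    rw [List.map_map]
    apply List.ext_getElem
    · simp
    · intro j hj1 hj2
      simp only [List.length_map, List.length_range] at hj1
      simp only [List.getElem_map, List.getElem_range, Function.comp]
      rw [colB_eq s.toList (Char.ofNat (j + 97))]
      rw [List.getD_eq_getElem _ _ (by simp only [List.length_map, List.length_range]; omega),
          List.getElem_map, List.getElem_range]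

-- ===== VERDICT (by name: the statement is the Claim_ definition above) =====
theorem calc_next_spec : Claim_equal_calc_next := by
  intro s _
  show calc_next s = calc_next_alt s
  rw [altB_eq]
  unfold calc_next
  simp only []
  apply foldA_inv s.toList s.toList.length le_rfl
  · simp
  · intro m hm1 hm2
    have : m = s.toList.length := by omega
    subst this
    rw [List.getD_eq_getElem _ _ (by simp), List.getElem_replicate, specRow_last]
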